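-- pv_equiv track=rewrite | github.com/schwobr/siim-pneumothorax | src/modules/mask_functions.py | absol2relat
-- ===== SOURCE A (Python) =====
-- def absol2relat(rle):
--     """
--     Converts a run-length encoded string with absolute values
--     to one with relative values
--
--     rle: rle string with absolute values
--
--     return: rle string with relative values
--     """
--     if rle == '-1':
--         return '-1'
--     pixels = rle.split()
--     new_rle = []
--     cur = 0
--     for k in range(0, len(pixels), 2):
--         if k == 0:
--             new_rle.append(pixels[k])
--             new_rle.append(pixels[k+1])
--         else:
--             cur = int(pixels[k])
--             prev = int(pixels[k-2])+int(pixels[k-1])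
--             new_rle.append(str(cur-prev))
--             new_rle.append(pixels[k+1])
--     return ' '.join(new_rle)
-- ===== SOURCE B (Python) =====
-- def absol2relat(rle):
--     """
--     Converts a run-length encoded string with absolute values
--     to one with relative values (recursive decomposition with a
--     threaded prev_end accumulator instead of back-indexing).
--     """
--     if rle == '-1':
--         return '-1'
--     return ' '.join(_convert(rle.split(), None))
--
--
-- def _convert(toks, prev_end):
--     if not toks:
--         return []
--     start, length = toks[0], toks[1]
--     if prev_end is None:
--         head = [start, length]
--     else:
--         head = [str(int(start) - prev_end), length]
--     rest = toks[2:]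
--     if not rest:
--         return head
--     return head + _convert(rest, int(start) + int(length))
-- ===== Notes on version B (the rewrite author's own statement) =====
-- stated objective: alternative
-- what changed: B is a recursive decomposition: a helper consumes the token list two tokens at a time threading an Optional prev_end accumulator forward, instead of A's index loop that back-indexes pixels[k-2]/pixels[k-1] and re-parses each token up to three times; Pre_ excludes only inputs where A raises (odd token count -> IndexError, non-parsable token among all but the last when there are >= 4 tokens -> ValueError).
import Mathlib
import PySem

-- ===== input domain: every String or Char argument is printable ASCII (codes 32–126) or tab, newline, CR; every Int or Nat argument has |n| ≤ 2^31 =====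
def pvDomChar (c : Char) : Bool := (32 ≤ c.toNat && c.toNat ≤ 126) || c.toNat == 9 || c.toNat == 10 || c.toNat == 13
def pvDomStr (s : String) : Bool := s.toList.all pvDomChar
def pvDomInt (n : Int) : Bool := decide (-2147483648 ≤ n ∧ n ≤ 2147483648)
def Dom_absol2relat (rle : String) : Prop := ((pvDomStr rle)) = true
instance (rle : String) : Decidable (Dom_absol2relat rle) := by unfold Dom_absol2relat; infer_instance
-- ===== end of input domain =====

-- B replaces A's back-indexing index loop by a recursion that consumes two tokens at a time,
-- threading a prev_end accumulator forward (alternative decomposition, same cost).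

-- ===== PORT A =====
-- Literal port of A. Python raises (IndexError / ValueError) exactly outside Pre_;
-- there the PySem primitives yield none and `.getD` defaults are used (unreachable under Pre_).
def absol2relat (rle : String) : String :=
  if rle == "-1" then "-1"
  else
    let pixels := PySem.Str.split₀ rle
    let new_rle : List String :=
      (PySem.List.pyRange 0 (pixels.length : Int) 2).foldl
        (fun acc k =>
          if k == 0 then
            acc ++ [PySem.List.pyGetD pixels k "", PySem.List.pyGetD pixels (k + 1) ""]
          else
            let cur := (PySem.Int.ofStr? (PySem.List.pyGetD pixels k "")).getD 0
            let prev := (PySem.Int.ofStr? (PySem.List.pyGetD pixels (k - 2) "")).getD 0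
                        + (PySem.Int.ofStr? (PySem.List.pyGetD pixels (k - 1) "")).getD 0
            acc ++ [PySem.Int.toStr (cur - prev), PySem.List.pyGetD pixels (k + 1) ""]) []
    PySem.Str.join " " new_rle

-- ===== PORT B =====
-- Literal port of Source B's _convert: recursion two tokens at a time with an Option Int accumulator.
-- On a single leftover token Python raises IndexError (toks[1]); that input is outside Pre_,
-- the port returns [] there to stay total.
def pvConvert : List String → Option Int → List String
  | [], _ => []
  | [_], _ => []
  | s :: l :: rest, prevEnd =>
    let head : List String :=
      match prevEnd with
      | none => [s, l]
      | some p => [PySem.Int.toStr ((PySem.Int.ofStr? s).getD 0 - p), l]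
    if rest.isEmpty then head
    else head ++ pvConvert rest (some ((PySem.Int.ofStr? s).getD 0 + (PySem.Int.ofStr? l).getD 0))

def absol2relat_alt (rle : String) : String :=
  if rle == "-1" then "-1"
  else PySem.Str.join " " (pvConvert (PySem.Str.split₀ rle) none)

-- ===== PRECONDITION & SPEC =====
-- Pre_ admits exactly the inputs where Python A returns: the sentinel string, or an even number of
-- whitespace-separated tokens of which (when there are ≥ 4) all but the last parse as ints;
-- outside it A raises IndexError (odd token count) or ValueError (int()).
def Pre_absol2relat (rle : String) : Prop :=
  rle = "-1" ∨
    (let pixels := PySem.Str.split₀ rle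
     pixels.length % 2 = 0 ∧
       (4 ≤ pixels.length →
         ∀ i < pixels.length - 1, (PySem.Int.ofStr? (pixels.getD i "")).isSome = true))
instance (rle : String) : Decidable (Pre_absol2relat rle) := by unfold Pre_absol2relat; infer_instance
def pvWitness_absol2relat : String := "1 2 5 3"

def Spec_absol2relat (rle : String) (out : String) : Prop := out = absol2relat_alt rle
instance (rle : String) (out : String) : Decidable (Spec_absol2relat rle out) := by unfold Spec_absol2relat; infer_instance

-- ===== CLAIM (what is proved, stated in full; the proofs are below) =====
def Claim_equal_absol2relat : Prop := ∀ (rle : String), Dom_absol2relat rle → Pre_absol2relat rle → Spec_absol2relat rle (absol2relat rle)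

-- ===== LEMMAS AND PROOFS =====

-- parsed value of a token (shorthand used by the proofs)
def pvV (s : String) : Int := (PySem.Int.ofStr? s).getD 0

-- the k-th chunk A's loop appends, in Nat-index form
def pvChunk (P : List String) (k : Nat) : List String :=
  if k = 0 then [P.getD 0 "", P.getD 1 ""]
  else [PySem.Int.toStr (pvV (P.getD (2 * k) "") - (pvV (P.getD (2 * k - 2) "") + pvV (P.getD (2 * k - 1) ""))),
        P.getD (2 * k + 1) ""]

-- range(0, n, 2) enumerated as doubled naturals
theorem pyRange_two (n : Nat) :
    PySem.List.pyRange 0 (n : Int) 2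
      = (List.range ((n + 1) / 2)).map (fun k : Nat => (2 * (k : Int))) := by
  rw [PySem.List.pyRange_of_pos _ _ (by norm_num)]
  have hcount : (if (0 : Int) < (n : Int) then (((n : Int) - 0 + 2 - 1) / 2).toNat else 0)
      = (n + 1) / 2 := by split_ifs with h <;> omega
  rw [hcount]
  exact List.map_congr_left (fun k _ => by ring)

-- A's loop as a flatMap of chunks
theorem A_flatMap (P : List String) :
    ((PySem.List.pyRange 0 (P.length : Int) 2).foldl
        (fun acc k =>
          if k == 0 then
            acc ++ [PySem.List.pyGetD P k "", PySem.List.pyGetD P (k + 1) ""]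
          else
            acc ++ [PySem.Int.toStr
                      ((PySem.Int.ofStr? (PySem.List.pyGetD P k "")).getD 0
                        - ((PySem.Int.ofStr? (PySem.List.pyGetD P (k - 2) "")).getD 0
                           + (PySem.Int.ofStr? (PySem.List.pyGetD P (k - 1) "")).getD 0)),
                    PySem.List.pyGetD P (k + 1) ""]) [])
      = (List.range ((P.length + 1) / 2)).flatMap (pvChunk P) := by
  rw [pyRange_two, List.foldl_map,
    PySem.List.foldl_congr_mem _ _
      (fun (acc : List String) (k : Nat) => acc ++ pvChunk P k) _
      (by
        intro acc k _
        by_cases hk0 : k = 0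
        · subst hk0
          simp [pvChunk, PySem.List.pyGetD_ofNat']
        · have h2 : ¬ ((2 * (k : Int)) = 0) := by omega
          simp only [beq_iff_eq, if_neg h2]
          unfold pvChunk
          rw [if_neg hk0]
          have e1 : (2 * (k : Int)) = ((2 * k : Nat) : Int) := by push_cast; ring
          have e2 : (2 * (k : Int)) - 2 = ((2 * k - 2 : Nat) : Int) := by omega
          have e3 : (2 * (k : Int)) - 1 = ((2 * k - 1 : Nat) : Int) := by omega
          have e4 : (2 * (k : Int)) + 1 = ((2 * k + 1 : Nat) : Int) := by push_cast; ring
          rw [e2, e3, e4, e1]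
          simp only [PySem.List.pyGetD_natCast]
          simp [pvV, List.getD]),
    PySem.List.foldl_append_eq_flatMap]
  simp

-- shifting a chunk index past one token pair
theorem pvChunk_shift (a b : String) (Q : List String) (k : Nat) (hk : 1 ≤ k) :
    pvChunk (a :: b :: Q) (k + 1) = pvChunk Q k := by
  unfold pvChunk
  rw [if_neg (by omega), if_neg (by omega)]
  have e1 : 2 * (k + 1) = 2 * k + 2 := by ring
  rw [e1]
  rw [show 2 * k + 2 - 2 = 2 * k - 2 + 2 from by omega,
      show 2 * k + 2 - 1 = 2 * k - 1 + 2 from by omega]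
  simp

-- unfolding equations for pvConvert on a token pair
theorem pvConvert_cons_some (s l : String) (rest : List String) (p : Int) :
    pvConvert (s :: l :: rest) (some p)
      = [PySem.Int.toStr (pvV s - p), l] ++ pvConvert rest (some (pvV s + pvV l)) := by
  cases rest <;> simp [pvConvert, pvV]

theorem pvConvert_cons_none (s l : String) (rest : List String) :
    pvConvert (s :: l :: rest) none
      = [s, l] ++ pvConvert rest (some (pvV s + pvV l)) := by
  cases rest <;> simp [pvConvert, pvV]

-- the tail of A's flatMap equals B's recursion with the threaded accumulator
theorem tail_eq : ∀ (n : Nat) (rest : List String), rest.length = n → rest.length % 2 = 0 →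
    ∀ s l : String,
      (List.range' 1 ((rest.length + 1) / 2)).flatMap (pvChunk (s :: l :: rest))
        = pvConvert rest (some (pvV s + pvV l)) := by
  intro n
  induction n using Nat.strong_induction_on with
  | _ n ih =>
    intro rest hlen heven s l
    match rest with
    | [] => simp [pvConvert]
    | [x] => simp at heven
    | x :: y :: rest' =>
      have hm : ((x :: y :: rest').length + 1) / 2 = (rest'.length + 1) / 2 + 1 := by
        simp only [List.length_cons]; omega
      rw [hm, List.range'_succ, List.flatMap_cons]
      have hchunk1 : pvChunk (s :: l :: x :: y :: rest') 1
          = [PySem.Int.toStr (pvV x - (pvV s + pvV l)), y] := by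
        unfold pvChunk
        norm_num
      have hshift : (List.range' 2 ((rest'.length + 1) / 2)).flatMap (pvChunk (s :: l :: x :: y :: rest'))
          = (List.range' 1 ((rest'.length + 1) / 2)).flatMap (pvChunk (x :: y :: rest')) := by
        have h2 : List.range' 2 ((rest'.length + 1) / 2)
            = (List.range' 1 ((rest'.length + 1) / 2)).map (fun x => 1 + x) := by
          rw [List.map_add_range']
        rw [h2, List.flatMap_map, List.flatMap_def, List.flatMap_def]
        refine congrArg List.flatten (List.map_congr_left fun k hk => ?_)
        rcases List.mem_range'.mp hk with ⟨hk1, _⟩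
        have hk1' : 1 ≤ k := by omega
        rw [show (1 : Nat) + k = k + 1 from by omega]
        exact pvChunk_shift s l _ k hk1' 
      rw [hchunk1, hshift]
      have hrec := ih rest'.length (by simp at hlen; omega) rest' rfl
        (by simp only [List.length_cons] at heven ⊢; omega) x y
      rw [hrec, pvConvert_cons_some]

-- full equality of the two token-list pipelines, for even token counts
theorem lists_eq (P : List String) (heven : P.length % 2 = 0) :
    (List.range ((P.length + 1) / 2)).flatMap (pvChunk P) = pvConvert P none := by
  match P with
  | [] => simp [pvConvert]
  | [x] => simp at heven
  | s :: l :: rest =>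
    have hm : ((s :: l :: rest).length + 1) / 2 = (rest.length + 1) / 2 + 1 := by
      simp only [List.length_cons]; omega
    rw [hm, List.range_eq_range', List.range'_succ, List.flatMap_cons]
    have h0 : pvChunk (s :: l :: rest) 0 = [s, l] := by unfold pvChunk; simp
    rw [h0, tail_eq rest.length rest rfl (by simp only [List.length_cons] at heven; omega) s l,
      pvConvert_cons_none]

-- ===== VERDICT (by name: the statement is the Claim_ definition above) =====
theorem absol2relat_spec : Claim_equal_absol2relat := by
  intro rle _ hpre
  unfold Spec_absol2relat absol2relat absol2relat_alt
  by_cases hc : rle == "-1"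
  · simp [hc]
  · simp only [hc, if_false, Bool.false_eq_true]
    have heven : (PySem.Str.split₀ rle).length % 2 = 0 := by
      rcases hpre with h | h
      · exact absurd h (by simpa using hc)
      · exact h.1
    rw [A_flatMap, lists_eq _ heven]
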